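-- pv_equiv track=rewrite | github.com/sajdoann/Inverted_amigos | 01_search_engine_python/query_engine.py | _compile_results_for_many_words
-- ===== SOURCE A (Python) =====
-- def _compile_results_for_many_words(results : list[list[tuple]]) -> list[tuple]:
--     compiled_results = []
--     different_words_number = len(results)
--     for book_1 in results[0]:
--         book_1_id = book_1[0]
--         occurence_count = 1
--         positions = [book_1[1]]
--         for word in results[1:]:
--             for book_2 in word:
--                 book_2_id = book_2[0]
--                 if book_2_id == book_1_id:
--                     occurence_count += 1
--                     positions.append(book_2[1])
--                     break
--         if occurence_count == different_words_number:
--             compiled_results.append((book_1_id, positions))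
--     return compiled_results
-- ===== SOURCE B (Python) =====
-- def _compile_results_for_many_words(results : list[list[tuple]]) -> list[tuple]:
--     # Word-major staged intersection: start from the candidates of results[0],
--     # then for each later word rebuild the surviving candidate list in one pass,
--     # keeping only ids the word contains (matched at its first position there).
--     survivors = [(book_id, [pos]) for book_id, pos in results[0]]
--     for word in results[1:]:
--         first = {}
--         for book_id, pos in word:
--             first.setdefault(book_id, pos)
--         survivors = [(book_id, positions + [first[book_id]])
--                      for book_id, positions in survivors if book_id in first]
--     return survivors
-- ===== Notes on version B (the rewrite author's own statement) =====
-- stated objective: faster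
-- what changed: Inverts the loop nesting: instead of A's per-candidate rescans of every word list, B folds word by word over a shrinking survivor list, rebuilding it in one pass per word from that word's first-occurrence table; Pre_ excludes the empty results list, on which A raises IndexError (B raises too).
import Mathlib
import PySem

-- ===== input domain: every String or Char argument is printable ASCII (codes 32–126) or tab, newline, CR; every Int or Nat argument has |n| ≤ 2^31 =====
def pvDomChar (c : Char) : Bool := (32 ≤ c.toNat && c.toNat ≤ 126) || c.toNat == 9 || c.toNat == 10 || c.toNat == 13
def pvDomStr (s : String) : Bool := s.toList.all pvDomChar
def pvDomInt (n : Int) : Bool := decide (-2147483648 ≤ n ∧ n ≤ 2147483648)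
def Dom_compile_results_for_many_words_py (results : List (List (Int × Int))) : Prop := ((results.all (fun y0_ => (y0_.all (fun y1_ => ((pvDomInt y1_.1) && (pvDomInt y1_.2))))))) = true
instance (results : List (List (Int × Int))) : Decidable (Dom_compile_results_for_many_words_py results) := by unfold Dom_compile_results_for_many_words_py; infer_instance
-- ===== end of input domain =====

-- B inverts the loop nesting: a word-by-word fold over a shrinking survivor list (one pass
-- per word via that word's first-occurrence table), asymptotically faster than A's
-- per-candidate rescans; Pre_ excludes the empty results list, on which A raises IndexError.


-- ===== PORT A =====
-- 'for book_2 in word: … break' — the inner scan with break, as structural recursion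
def pyA_inner (bid : Int) (word : List (Int × Int)) (occ : Int) (positions : List Int) : Int × List Int :=
  match word with
  | [] => (occ, positions)
  | b2 :: rest =>
    if b2.1 == bid then (occ + 1, positions ++ [b2.2]) else pyA_inner bid rest occ positions

def compile_results_for_many_words_py (results : List (List (Int × Int))) : List (Int × List Int) :=
  match results with
  | [] => []  -- Python: results[0] raises IndexError here; excluded by Pre_
  | book1s :: restWords =>      -- results[0] and results[1:]
    let n : Int := (results.length : Int)   -- different_words_number
    book1s.foldl (fun compiled b1 =>
      let st := restWords.foldl (fun s w => pyA_inner b1.1 w s.1 s.2) (1, [b1.2])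
      if st.1 == n then compiled ++ [(b1.1, st.2)] else compiled) []

-- ===== PORT B =====
-- first = {}; for book_id, pos in word: first.setdefault(book_id, pos)
def pyB_first (word : List (Int × Int)) : PySem.Dict Int Int :=
  word.foldl (fun d p => d.setdefault p.1 p.2) PySem.Dict.empty

-- 'survivors = [(id, ps + [first[id]]) for id, ps in survivors if id in first]'
def pyB_step (surv : List (Int × List Int)) (word : List (Int × Int)) : List (Int × List Int) :=
  let first := pyB_first word
  surv.filterMap (fun e =>
    match first.get? e.1 with
    | some q => some (e.1, e.2 ++ [q])
    | none => none)

def compile_results_for_many_words_py_alt (results : List (List (Int × Int))) : List (Int × List Int) :=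
  match results with
  | [] => []  -- B's results[0] raises IndexError here too; excluded by Pre_
  | book1s :: restWords =>
    restWords.foldl pyB_step (book1s.map (fun p => (p.1, [p.2])))

-- ===== PRECONDITION & SPEC =====
-- A evaluates results[0]: the empty list raises IndexError (B raises there too).
def Pre_compile_results_for_many_words_py (results : List (List (Int × Int))) : Prop := results ≠ []
instance (results : List (List (Int × Int))) : Decidable (Pre_compile_results_for_many_words_py results) := by unfold Pre_compile_results_for_many_words_py; infer_instance

def pvWitness_compile_results_for_many_words_py : (List (List (Int × Int))) := [[(1, 2)], [(1, 5), (3, 7)]]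

def Spec_compile_results_for_many_words_py (results : List (List (Int × Int))) (out : List (Int × List Int)) : Prop := out = compile_results_for_many_words_py_alt results
instance (results : List (List (Int × Int))) (out : List (Int × List Int)) : Decidable (Spec_compile_results_for_many_words_py results out) := by unfold Spec_compile_results_for_many_words_py; infer_instance

-- ===== CLAIM =====
def Claim_equal_compile_results_for_many_words_py : Prop := ∀ (results : List (List (Int × Int))), Dom_compile_results_for_many_words_py results → Pre_compile_results_for_many_words_py results → Spec_compile_results_for_many_words_py results (compile_results_for_many_words_py results)

-- ===== LEMMAS AND PROOFS =====

-- setdefault keeps the FIRST position of each id: lookup = find? on the word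
theorem pyB_first_get? (word : List (Int × Int)) (bid : Int) :
    (pyB_first word).get? bid = (word.find? (fun p => p.1 == bid)).map (·.2) := by
  have gen : ∀ (w : List (Int × Int)) (d : PySem.Dict Int Int),
      (w.foldl (fun d p => d.setdefault p.1 p.2) d).get? bid
        = (d.get? bid).or ((w.find? (fun p => p.1 == bid)).map (·.2)) := by
    intro w
    induction w with
    | nil => intro d; simp
    | cons p rest ih =>
      intro d
      simp only [List.foldl_cons, ih, List.find?_cons]
      by_cases hp : p.1 = bid
      · subst hp
        simp only [beq_self_eq_true]
        rw [PySem.Dict.get?_setdefault_self]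
        cases h : d.get? p.1 <;> simp [h]
      · have hbe : (p.1 == bid) = false := by simp [hp]
        simp only [hbe]
        rw [PySem.Dict.get?_setdefault_of_ne _ _ (Ne.symm hp)]
  simpa [PySem.Dict.get?_empty] using gen word PySem.Dict.empty

-- the per-candidate trace of B's staged folds: first match per word, fail on a miss
def collectB (bid : Int) (words : List (List (Int × Int))) (ps : List Int) : Option (List Int) :=
  match words with
  | [] => some ps
  | w :: rest =>
    match w.find? (fun p => p.1 == bid) with
    | some p => collectB bid rest (ps ++ [p.2])
    | none => none

-- B's word-major fold = per-candidate filterMap of collectB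
theorem foldB_eq_filterMap (words : List (List (Int × Int))) (surv : List (Int × List Int)) :
    words.foldl pyB_step surv
      = surv.filterMap (fun e => (collectB e.1 words e.2).map (fun ps => (e.1, ps))) := by
  induction words generalizing surv with
  | nil => simp [collectB]
  | cons w rest ih =>
    rw [List.foldl_cons, ih, pyB_step, List.filterMap_filterMap]
    apply List.filterMap_congr
    intro e _
    rw [pyB_first_get?]
    cases hf : w.find? (fun p => p.1 == e.1) <;> simp [collectB, hf]

-- A's inner loop in terms of find?
theorem pyA_inner_eq_find (bid : Int) (word : List (Int × Int)) (occ : Int) (positions : List Int) :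
    pyA_inner bid word occ positions
      = match word.find? (fun p => p.1 == bid) with
        | some p => (occ + 1, positions ++ [p.2])
        | none => (occ, positions) := by
  induction word with
  | nil => simp [pyA_inner]
  | cons b2 rest ih =>
    rw [pyA_inner, List.find?_cons]
    by_cases h : (b2.1 == bid) = true
    · simp [h]
    · simp only [h, if_neg, Bool.false_eq_true, not_false_eq_true, ih]

-- A's fold over the remaining words versus collectB
theorem main_invariant (bid : Int) :
    ∀ (words : List (List (Int × Int))) (occ : Int) (positions : List Int),
      (((words.foldl (fun s w => pyA_inner bid w s.1 s.2) (occ, positions)).1 = occ + words.length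
          ∧ collectB bid words positions
              = some (words.foldl (fun s w => pyA_inner bid w s.1 s.2) (occ, positions)).2)
        ∨ ((words.foldl (fun s w => pyA_inner bid w s.1 s.2) (occ, positions)).1 < occ + words.length
          ∧ collectB bid words positions = none)) := by
  intro words
  induction words with
  | nil => intro occ positions; left; simp [collectB]
  | cons w rest ih =>
    intro occ positions
    simp only [List.foldl_cons, List.length_cons]
    rw [pyA_inner_eq_find]
    cases hf : w.find? (fun p => p.1 == bid) with
    | some p =>
      simp only
      have hcol : collectB bid (w :: rest) positions = collectB bid rest (positions ++ [p.2]) := by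
        simp [collectB, hf]
      rw [hcol]
      rcases ih (occ + 1) (positions ++ [p.2]) with ⟨h1, h2⟩ | ⟨h1, h2⟩
      · left; exact ⟨by rw [h1]; push_cast; ring, h2⟩
      · right; exact ⟨by push_cast at h1 ⊢; omega, h2⟩
    | none =>
      simp only
      have hcol : collectB bid (w :: rest) positions = none := by
        simp [collectB, hf]
      rcases ih occ positions with ⟨h1, _⟩ | ⟨h1, _⟩
      · right; exact ⟨by rw [h1]; push_cast; omega, hcol⟩
      · right; exact ⟨by push_cast at h1 ⊢; omega, hcol⟩

-- A's append-if fold = filterMap of the same per-candidate decision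
theorem foldA_eq_filterMap (book1s : List (Int × Int)) (restWords : List (List (Int × Int))) (n : Int) :
    book1s.foldl (fun compiled b1 =>
        let st := restWords.foldl (fun s w => pyA_inner b1.1 w s.1 s.2) (1, [b1.2])
        if st.1 == n then compiled ++ [(b1.1, st.2)] else compiled) []
      = book1s.filterMap (fun b1 =>
          let st := restWords.foldl (fun s w => pyA_inner b1.1 w s.1 s.2) (1, [b1.2])
          if st.1 == n then some (b1.1, st.2) else none) := by
  have gen : ∀ (l : List (Int × Int)) (acc : List (Int × List Int)),
      l.foldl (fun compiled b1 =>
          let st := restWords.foldl (fun s w => pyA_inner b1.1 w s.1 s.2) (1, [b1.2])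
          if st.1 == n then compiled ++ [(b1.1, st.2)] else compiled) acc
        = acc ++ l.filterMap (fun b1 =>
            let st := restWords.foldl (fun s w => pyA_inner b1.1 w s.1 s.2) (1, [b1.2])
            if st.1 == n then some (b1.1, st.2) else none) := by
    intro l
    induction l with
    | nil => intro acc; simp
    | cons b1 rest ih =>
      intro acc
      simp only [List.foldl_cons, List.filterMap_cons]
      by_cases h : ((restWords.foldl (fun s w => pyA_inner b1.1 w s.1 s.2) (1, [b1.2])).1 == n) = true
      · simp only [h, if_pos, ih]; try simp
      · simp only [h, Bool.false_eq_true, if_false, ih]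
  rw [gen book1s [], List.nil_append]

-- ===== VERDICT (by name: the statement is the Claim_ definition above) =====
theorem compile_results_for_many_words_py_spec : Claim_equal_compile_results_for_many_words_py := by
  intro results _ hpre
  unfold Spec_compile_results_for_many_words_py
  match results with
  | [] => exact absurd rfl hpre
  | book1s :: restWords =>
    rw [compile_results_for_many_words_py, compile_results_for_many_words_py_alt]
    simp only
    rw [foldA_eq_filterMap, foldB_eq_filterMap, List.filterMap_map]
    apply List.filterMap_congr
    intro b1 _
    simp only [Function.comp]
    rcases main_invariant b1.1 restWords 1 [b1.2] with ⟨h1, h2⟩ | ⟨h1, h2⟩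
    · rw [h2]
      have : ((restWords.foldl (fun s w => pyA_inner b1.1 w s.1 s.2) (1, [b1.2])).1
          == ((book1s :: restWords).length : Int)) = true := by
        simp only [beq_iff_eq, h1, List.length_cons]; push_cast; ring
      simp only [this, if_pos]
      simp
    · rw [h2]
      have : ((restWords.foldl (fun s w => pyA_inner b1.1 w s.1 s.2) (1, [b1.2])).1
          == ((book1s :: restWords).length : Int)) = false := by
        simp only [beq_eq_false_iff_ne, ne_eq, List.length_cons]
        intro he; rw [he] at h1; push_cast at h1; omega
      simp only [this, Bool.false_eq_true, if_false]
      simp
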